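-- pv_equiv track=rewrite | github.com/binhao22/Algorithm-Test | 프로그래머스/unrated/120886. A로 B 만들기/A로 B 만들기.py | solution
-- ===== SOURCE A (Python) =====
-- def solution(before, after):
--     answer = 0
--     for i in before:
--         if i in after:
--             after = after.replace(i, "", 1)
--     if after == "":
--         answer = 1
--     return answer
-- ===== SOURCE B (Python) =====
-- def solution(before, after):
--     # after can be built from before's letters iff each distinct character
--     # of after occurs in before at least as often as in after
--     return 1 if all(after.count(c) <= before.count(c) for c in set(after)) else 0
-- ===== Notes on version B (the rewrite author's own statement) =====
-- stated objective: faster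
-- what changed: Replaces A's loop that destructively erases matched characters from `after` via repeated `in`/`replace` scans with a per-distinct-character count comparison (multiset-subset check by counting).
import Mathlib
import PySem

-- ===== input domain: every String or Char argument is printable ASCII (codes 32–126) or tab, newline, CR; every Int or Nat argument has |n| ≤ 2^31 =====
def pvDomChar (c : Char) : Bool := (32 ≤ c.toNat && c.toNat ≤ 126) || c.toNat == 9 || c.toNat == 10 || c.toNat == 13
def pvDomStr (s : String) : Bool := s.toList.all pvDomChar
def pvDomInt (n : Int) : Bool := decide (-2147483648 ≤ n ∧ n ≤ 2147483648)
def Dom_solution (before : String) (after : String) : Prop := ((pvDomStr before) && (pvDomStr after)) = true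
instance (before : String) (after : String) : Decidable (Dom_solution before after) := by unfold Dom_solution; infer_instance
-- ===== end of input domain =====

-- B is a one-line per-distinct-character count comparison instead of A's destructive erase loop.
-- (No mutation visible to the caller: Python strings are immutable.)

-- ===== PORT A =====
-- A's loop state is the shrinking string `after`; one step per character of `before`.
-- `i in after` on a 1-character `i` is character membership; `after.replace(i, "", 1)`
-- removes the FIRST occurrence of the character `i` (exactly List.erase) — both exact
-- because `i` here is always a single character drawn from `before`.
def solution (before : String) (after : String) : Int :=
  let rest := before.toList.foldl (fun a i => if i ∈ a then a.erase i else a) after.toList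
  if rest = [] then 1 else 0

-- ===== PORT B =====
-- set(after) = PySem.Set.ofList; `s.count(c)` on a 1-character pattern is List.count (exact).
def solution_alt (before : String) (after : String) : Int :=
  if (PySem.Set.ofList after.toList).all
      (fun c => after.toList.count c ≤ before.toList.count c) then 1 else 0

-- ===== PRECONDITION & SPEC =====
def Spec_solution (before : String) (after : String) (out : Int) : Prop := out = solution_alt before after
instance (before : String) (after : String) (out : Int) : Decidable (Spec_solution before after out) := by unfold Spec_solution; infer_instance

-- ===== CLAIM (what is proved, stated in full; the proofs are below) =====
def Claim_equal_solution : Prop := ∀ (before : String) (after : String), Dom_solution before after → Spec_solution before after (solution before after)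

-- ===== LEMMAS AND PROOFS =====

-- A's step always equals erase (erase is the identity when the element is absent)
theorem pv_step_eq_erase (a : List Char) (i : Char) :
    (if i ∈ a then a.erase i else a) = a.erase i := by
  split_ifs with h
  · rfl
  · exact (List.erase_of_not_mem h).symm

-- A's fold empties the state exactly when `after` is a sub-multiset of `before`
theorem pv_foldl_erase_nil_iff (bs : List Char) : ∀ a : List Char,
    bs.foldl List.erase a = [] ↔ (a : Multiset Char) ≤ (bs : Multiset Char) := by
  induction bs with
  | nil =>
      intro a
      simp
  | cons b bs ih =>
      intro a
      rw [List.foldl_cons, ih (a.erase b)]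
      rw [show ((a.erase b : List Char) : Multiset Char) = (a : Multiset Char).erase b from
        (Multiset.coe_erase a b).symm ▸ rfl]
      exact Multiset.erase_le_iff_le_cons

-- B's per-distinct-character count test is the same sub-multiset condition
theorem pv_all_count_iff (l m : List Char) :
    ((PySem.Set.ofList l).all (fun c => l.count c ≤ m.count c) = true)
      ↔ (l : Multiset Char) ≤ (m : Multiset Char) := by
  rw [Multiset.le_iff_count]
  simp only [List.all_eq_true, PySem.Set.mem_ofList, decide_eq_true_eq]
  constructor
  · intro h c
    by_cases hc : c ∈ l
    · simpa using h c hc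
    · simp [List.count_eq_zero_of_not_mem hc]
  · intro h c _
    simpa using h c

-- ===== VERDICT (by name: the statement is the Claim_ definition above) =====
theorem solution_spec : Claim_equal_solution := by
  intro before after _
  unfold Spec_solution solution solution_alt
  simp only [pv_step_eq_erase]
  rw [show (fun (a : List Char) (i : Char) => a.erase i) = List.erase from rfl]
  by_cases h : (after.toList : Multiset Char) ≤ (before.toList : Multiset Char)
  · rw [if_pos ((pv_foldl_erase_nil_iff _ _).mpr h),
        if_pos ((pv_all_count_iff _ _).mpr h)]
  · rw [if_neg (fun hc => h ((pv_foldl_erase_nil_iff _ _).mp hc)),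
        if_neg (fun hc => h ((pv_all_count_iff _ _).mp hc))]
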